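-- pv_equiv track=rewrite | github.com/MidwestJohn/line-lead-qsr-assistant | backend/services/qsr_entity_extractor.py | enhance_entities_with_qsr_context
-- ===== SOURCE A (Python) =====
-- from typing import List, Dict, Any, Tuple
--
-- def enhance_entities_with_qsr_context(entities: List[Dict[str, Any]]) -> List[Dict[str, Any]]:
--     """Enhance entities with QSR-specific context"""
--
--     enhanced_entities = []
--
--     for entity in entities:
--         enhanced_entity = entity.copy()
--
--         # Add QSR-specific enhancements
--         if "slicer" in entity["name"].lower():
--             enhanced_entity["category"] = "Food Preparation Equipment"
--             enhanced_entity["safety_level"] = "High"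
--             enhanced_entity["maintenance_frequency"] = "Daily"
--         elif "wear" in entity["name"].lower():
--             enhanced_entity["category"] = "Measurement Tool"
--             enhanced_entity["purpose"] = "Quality Control"
--         elif "toolkit" in entity["name"].lower():
--             enhanced_entity["category"] = "Maintenance Tools"
--             enhanced_entity["scope"] = "Equipment Service"
--         elif "blade" in entity["name"].lower():
--             enhanced_entity["category"] = "Cutting Component"
--             enhanced_entity["safety_level"] = "Critical"
--
--         enhanced_entities.append(enhanced_entity)
--
--     return enhanced_entities
-- ===== SOURCE B (Python) =====
-- from typing import List, Dict, Any, Tuple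
--
-- # Ordered keyword -> extra-fields table (same priority order as A's elif chain).
-- QSR_TABLE: List[Tuple[str, Dict[str, str]]] = [
--     ("slicer", {"category": "Food Preparation Equipment", "safety_level": "High", "maintenance_frequency": "Daily"}),
--     ("wear", {"category": "Measurement Tool", "purpose": "Quality Control"}),
--     ("toolkit", {"category": "Maintenance Tools", "scope": "Equipment Service"}),
--     ("blade", {"category": "Cutting Component", "safety_level": "Critical"}),
-- ]
--
-- def enhance_entities_with_qsr_context(entities: List[Dict[str, Any]]) -> List[Dict[str, Any]]:
--     # Recursive decomposition; per entity: collect ALL matching keyword indices,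
--     # pick the highest-priority one with min(), build the result by dict merge.
--     if not entities:
--         return []
--     entity = entities[0]
--     name_lower = entity["name"].lower()
--     matches = [i for i, (kw, _) in enumerate(QSR_TABLE) if kw in name_lower]
--     if matches:
--         enhanced = {**entity, **QSR_TABLE[min(matches)][1]}
--     else:
--         enhanced = dict(entity)
--     return [enhanced] + enhance_entities_with_qsr_context(entities[1:])
-- ===== Notes on version B (the rewrite author's own statement) =====
-- stated objective: alternative
-- what changed: Replaces A's short-circuiting elif chain and in-place copy/update accumulation loop by a recursive pass that, per entity, collects all matching keyword indices of an ordered table, selects the highest-priority match with min(), and builds the result by dict merge.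
import Mathlib
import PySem

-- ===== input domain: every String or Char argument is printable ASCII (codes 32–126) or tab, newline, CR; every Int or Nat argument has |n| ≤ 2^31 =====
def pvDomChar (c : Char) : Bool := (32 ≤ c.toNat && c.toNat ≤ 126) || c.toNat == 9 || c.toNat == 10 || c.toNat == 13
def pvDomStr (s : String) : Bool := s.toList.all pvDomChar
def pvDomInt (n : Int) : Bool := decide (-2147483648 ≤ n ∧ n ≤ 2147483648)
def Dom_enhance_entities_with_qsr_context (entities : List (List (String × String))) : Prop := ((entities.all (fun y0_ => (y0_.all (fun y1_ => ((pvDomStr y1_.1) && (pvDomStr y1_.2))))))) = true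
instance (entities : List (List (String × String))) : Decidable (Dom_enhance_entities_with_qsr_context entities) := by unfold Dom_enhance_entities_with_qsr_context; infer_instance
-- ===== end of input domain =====

-- B replaces A's short-circuiting elif chain and accumulation loop by a recursive pass that
-- collects all matching table indices, picks min(), and builds each result by dict merge (alternative).

-- ===== PORT A =====
-- per-entity body of A's loop: copy, elif chain on keyword containment, chained key assignments
def pvEnhanceA (entity : List (String × String)) : List (String × String) :=
  let d := PySem.Dict.mk entity
  let nl := PySem.Str.lower (((PySem.Dict.mk entity).get? "name").getD "")
  let d :=
    if PySem.Str.isIn "slicer" nl then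
      ((d.insert "category" "Food Preparation Equipment").insert "safety_level" "High").insert "maintenance_frequency" "Daily"
    else if PySem.Str.isIn "wear" nl then
      (d.insert "category" "Measurement Tool").insert "purpose" "Quality Control"
    else if PySem.Str.isIn "toolkit" nl then
      (d.insert "category" "Maintenance Tools").insert "scope" "Equipment Service"
    else if PySem.Str.isIn "blade" nl then
      (d.insert "category" "Cutting Component").insert "safety_level" "Critical"
    else d
  d.items

def enhance_entities_with_qsr_context (entities : List (List (String × String))) : List (List (String × String)) :=
  entities.foldl (fun acc entity => acc ++ [pvEnhanceA entity]) []

-- ===== PORT B =====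
def qsrTable : List (String × List (String × String)) :=
  [ ("slicer", [("category", "Food Preparation Equipment"), ("safety_level", "High"), ("maintenance_frequency", "Daily")]),
    ("wear", [("category", "Measurement Tool"), ("purpose", "Quality Control")]),
    ("toolkit", [("category", "Maintenance Tools"), ("scope", "Equipment Service")]),
    ("blade", [("category", "Cutting Component"), ("safety_level", "Critical")]) ]

-- per-entity body of B: all matching indices, min(), dict merge
def pvEnhanceB (entity : List (String × String)) : List (String × String) :=
  let nl := PySem.Str.lower (((PySem.Dict.mk entity).get? "name").getD "")
  let ms := ((PySem.List.enumerate qsrTable).filter (fun p => PySem.Str.isIn p.2.1 nl)).map (fun p => p.1)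
  match PySem.List.min? ms (fun x => x) with
  | some i => (PySem.Dict.update (PySem.Dict.mk entity) (((PySem.List.pyGet? qsrTable i).getD ("", [])).2)).items
  | none => (PySem.Dict.mk entity).items

def enhance_entities_with_qsr_context_alt (entities : List (List (String × String))) : List (List (String × String)) :=
  match entities with
  | [] => []
  | entity :: rest => pvEnhanceB entity :: enhance_entities_with_qsr_context_alt rest

-- ===== PRECONDITION & SPEC =====
-- Pre_ excludes entities without a "name" key (Python A raises KeyError there) and association
-- lists with duplicate keys, which do not represent a Python dict.
def Pre_enhance_entities_with_qsr_context (entities : List (List (String × String))) : Prop :=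
  ∀ e ∈ entities, (PySem.Dict.mk e).contains "name" = true ∧ (e.map Prod.fst).Nodup
instance (entities : List (List (String × String))) : Decidable (Pre_enhance_entities_with_qsr_context entities) := by unfold Pre_enhance_entities_with_qsr_context; infer_instance
def pvWitness_enhance_entities_with_qsr_context : (List (List (String × String))) := [[("name", "Meat Slicer"), ("id", "7")]]

def Spec_enhance_entities_with_qsr_context (entities : List (List (String × String))) (out : List (List (String × String))) : Prop := out = enhance_entities_with_qsr_context_alt entities
instance (entities : List (List (String × String))) (out : List (List (String × String))) : Decidable (Spec_enhance_entities_with_qsr_context entities out) := by unfold Spec_enhance_entities_with_qsr_context; infer_instance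

-- ===== CLAIM (what is proved, stated in full; the proofs are below) =====
def Claim_equal_enhance_entities_with_qsr_context : Prop := ∀ (entities : List (List (String × String))), Dom_enhance_entities_with_qsr_context entities → Pre_enhance_entities_with_qsr_context entities → Spec_enhance_entities_with_qsr_context entities (enhance_entities_with_qsr_context entities)

-- ===== LEMMAS AND PROOFS =====
theorem pvEnhance_eq (e : List (String × String)) : pvEnhanceA e = pvEnhanceB e := by
  unfold pvEnhanceA pvEnhanceB qsrTable
  by_cases h1 : PySem.Chars.isIn ['s', 'l', 'i', 'c', 'e', 'r'] (PySem.Chars.lower (((PySem.Dict.mk e).get? "name").getD "").toList) = true <;>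
  by_cases h2 : PySem.Chars.isIn ['w', 'e', 'a', 'r'] (PySem.Chars.lower (((PySem.Dict.mk e).get? "name").getD "").toList) = true <;>
  by_cases h3 : PySem.Chars.isIn ['t', 'o', 'o', 'l', 'k', 'i', 't'] (PySem.Chars.lower (((PySem.Dict.mk e).get? "name").getD "").toList) = true <;>
  by_cases h4 : PySem.Chars.isIn ['b', 'l', 'a', 'd', 'e'] (PySem.Chars.lower (((PySem.Dict.mk e).get? "name").getD "").toList) = true <;>
  simp [h1, h2, h3, h4, PySem.List.enumerate, PySem.List.min?, PySem.Dict.update,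
        PySem.List.pyGet?, PySem.List.pyIdx?]

theorem alt_snoc (xs : List (List (String × String))) (x : List (String × String)) :
    enhance_entities_with_qsr_context_alt (xs ++ [x]) = enhance_entities_with_qsr_context_alt xs ++ [pvEnhanceB x] := by
  induction xs with
  | nil => rfl
  | cons y ys ih => simp [enhance_entities_with_qsr_context_alt, ih]

theorem foldl_append_eq_alt (l : List (List (String × String))) :
    l.foldl (fun acc entity => acc ++ [pvEnhanceA entity]) [] = enhance_entities_with_qsr_context_alt l := by
  induction l using List.reverseRecOn with
  | nil => rfl
  | append_singleton xs x ih => rw [List.foldl_append, ih, alt_snoc]; simp [List.foldl, pvEnhance_eq]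

-- ===== VERDICT (by name: the statement is the Claim_ definition above) =====
theorem enhance_entities_with_qsr_context_spec : Claim_equal_enhance_entities_with_qsr_context := by
  intro entities _ _
  unfold Spec_enhance_entities_with_qsr_context enhance_entities_with_qsr_context
  exact foldl_append_eq_alt entities
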